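-- pv_equiv track=rewrite | github.com/HYPERLABS/pandora | src/mtdr/python/service_browser.py | _trim_service_list
-- ===== SOURCE A (Python) =====
-- def _trim_service_list(service_list: list, trim_by_key: str) -> list:
--     """Merges entries in the list if they have a matching key."""
--     merged = {}
--     for entry in service_list:
--         key = entry[trim_by_key]
--         if key in merged:
--             if entry["name"]: merged[key]["name"] += ' | ' + entry["name"]
--         else:
--             merged[key] = entry.copy()
--     return list(merged.values())
-- ===== SOURCE B (Python) =====
-- def _trim_service_list(service_list: list, trim_by_key: str) -> list:
--     """Merges entries in the list if they have a matching key (group-then-merge)."""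
--     groups = {}
--     for entry in service_list:
--         groups.setdefault(entry[trim_by_key], []).append(entry)
--     result = []
--     for group in groups.values():
--         merged = group[0].copy()
--         extra = ''.join(' | ' + e["name"] for e in group[1:] if e["name"])
--         if extra:
--             merged["name"] += extra
--         result.append(merged)
--     return result
-- ===== Notes on version B (the rewrite author's own statement) =====
-- stated objective: alternative
-- what changed: B first groups entries by key into an insertion-ordered dict of lists, then in a second pass merges each group at once by joining the truthy tail names and appending the join to a copy of the group head, instead of A's single pass that mutates the merged dict entry incrementally.
import Mathlib
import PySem

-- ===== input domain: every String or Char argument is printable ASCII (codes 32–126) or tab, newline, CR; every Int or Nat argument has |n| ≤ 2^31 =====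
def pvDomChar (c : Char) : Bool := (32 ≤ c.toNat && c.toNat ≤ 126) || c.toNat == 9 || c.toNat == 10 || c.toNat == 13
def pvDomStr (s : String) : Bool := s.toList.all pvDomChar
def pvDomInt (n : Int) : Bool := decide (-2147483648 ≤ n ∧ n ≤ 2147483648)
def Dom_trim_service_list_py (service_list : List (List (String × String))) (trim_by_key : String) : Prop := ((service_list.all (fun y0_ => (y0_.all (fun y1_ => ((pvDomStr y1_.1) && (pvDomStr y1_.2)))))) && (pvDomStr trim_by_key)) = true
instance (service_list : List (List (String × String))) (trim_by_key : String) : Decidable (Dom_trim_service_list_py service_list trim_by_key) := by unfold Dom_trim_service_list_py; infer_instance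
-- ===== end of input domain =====

-- B groups the entries by key in one pass and then merges each group at once (join the
-- truthy tail names, append once to a copy of the head), instead of A's incremental
-- per-entry mutation of the merged dict; same cost, different decomposition.

-- ===== PORT A =====
-- entry[key] for an entry dict (assoc list, first match); Pre_ guarantees the key is
-- present wherever Python reads it, so the "" default is never observed.
def entryGet (e : List (String × String)) (key : String) : String :=
  match e with
  | [] => ""
  | (k', v) :: rest => if k' = key then v else entryGet rest key

-- d["name"] += s : append s to the value of the first "name" pair, keeping its position
-- (Pre_ guarantees "name" is present wherever Python performs this, so the identity
-- fallback on a missing "name" is never observed).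
def nameAppend (e : List (String × String)) (s : String) : List (String × String) :=
  match e with
  | [] => []
  | (k', v) :: rest => if k' = "name" then (k', v ++ s) :: rest else (k', v) :: nameAppend rest s

def trim_service_list_py (service_list : List (List (String × String))) (trim_by_key : String) : List (List (String × String)) :=
  (service_list.foldl
    (fun (merged : PySem.Dict String (List (String × String))) entry =>
      let key := entryGet entry trim_by_key
      if merged.contains key then
        if entryGet entry "name" ≠ "" then
          merged.insert key (nameAppend (merged.getD key []) (" | " ++ entryGet entry "name"))
        else merged
      else merged.insert key entry)
    PySem.Dict.empty).values

-- ===== PORT B =====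
def trim_service_list_py_alt (service_list : List (List (String × String))) (trim_by_key : String) : List (List (String × String)) :=
  let groups := service_list.foldl
    (fun (g : PySem.Dict String (List (List (String × String)))) entry =>
      g.insert (entryGet entry trim_by_key) (g.getD (entryGet entry trim_by_key) [] ++ [entry]))
    PySem.Dict.empty
  groups.values.map (fun group =>
    let merged := group.headD []
    let extra := (group.drop 1).foldl
      (fun acc e => if entryGet e "name" ≠ "" then acc ++ (" | " ++ entryGet e "name") else acc) ""
    if extra ≠ "" then nameAppend merged extra else merged)

-- ===== PRECONDITION & SPEC =====
-- Pre_ excludes (a) entries whose association list repeats a key — no Python dict is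
-- represented by such a list — and (b) exactly the inputs on which the Python A raises
-- KeyError: an entry missing trim_by_key, a duplicate-key entry missing "name", or a
-- group head missing "name" while some later entry of its group has a truthy "name".
def Pre_trim_service_list_py (service_list : List (List (String × String))) (trim_by_key : String) : Prop :=
  (∀ e ∈ service_list, (e.map Prod.fst).Nodup ∧ (List.lookup trim_by_key e).isSome = true) ∧
  service_list.Pairwise (fun e1 e2 =>
    (List.lookup trim_by_key e1).getD "" = (List.lookup trim_by_key e2).getD "" →
      (List.lookup "name" e2).isSome = true ∧
      ((List.lookup "name" e2).getD "" ≠ "" → (List.lookup "name" e1).isSome = true))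
instance (service_list : List (List (String × String))) (trim_by_key : String) : Decidable (Pre_trim_service_list_py service_list trim_by_key) := by unfold Pre_trim_service_list_py; infer_instance

def pvWitness_trim_service_list_py : (List (List (String × String))) × String :=
  ([[("name", "a"), ("k", "x")], [("k", "x"), ("name", "b")], [("k", "y"), ("name", "")]], "k")

def Spec_trim_service_list_py (service_list : List (List (String × String))) (trim_by_key : String) (out : List (List (String × String))) : Prop := out = trim_service_list_py_alt service_list trim_by_key
instance (service_list : List (List (String × String))) (trim_by_key : String) (out : List (List (String × String))) : Decidable (Spec_trim_service_list_py service_list trim_by_key out) := by unfold Spec_trim_service_list_py; infer_instance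

-- ===== CLAIM (what is proved, stated in full; the proofs are below) =====
def Claim_equal_trim_service_list_py : Prop := ∀ (service_list : List (List (String × String))) (trim_by_key : String), Dom_trim_service_list_py service_list trim_by_key → Pre_trim_service_list_py service_list trim_by_key → Spec_trim_service_list_py service_list trim_by_key (trim_service_list_py service_list trim_by_key)

-- ===== LEMMAS AND PROOFS =====

-- A's sequential merge of a whole group (head first, then fold A's step over the tail).
def seqMerge (grp : List (List (String × String))) : List (String × String) :=
  match grp with
  | [] => []
  | h :: t => t.foldl
      (fun cur e => if entryGet e "name" ≠ "" then nameAppend cur (" | " ++ entryGet e "name") else cur) h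

-- the joined tail-names string of B's second pass
def extraOf (t : List (List (String × String))) : String :=
  t.foldl (fun acc e => if entryGet e "name" ≠ "" then acc ++ (" | " ++ entryGet e "name") else acc) ""

-- B's group dict, viewed through A's merge: same keys, each group replaced by its merge
def mvEntry (p : String × List (List (String × String))) : String × List (String × String) :=
  (p.1, seqMerge p.2)
def mapVals (g : PySem.Dict String (List (List (String × String)))) : PySem.Dict String (List (String × String)) :=
  PySem.Dict.mk (g.items.map mvEntry)

theorem nameAppend_empty (e : List (String × String)) : nameAppend e "" = e := by
  induction e with
  | nil => rfl
  | cons p rest ih =>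
    obtain ⟨k, v⟩ := p
    simp only [nameAppend]
    split_ifs <;> simp [String.append_empty, ih]

theorem nameAppend_append (e : List (String × String)) (a b : String) :
    nameAppend (nameAppend e a) b = nameAppend e (a ++ b) := by
  induction e with
  | nil => rfl
  | cons p rest ih =>
    obtain ⟨k, v⟩ := p
    simp only [nameAppend]
    split_ifs with h <;> simp [nameAppend, h, String.append_assoc, ih]

theorem extra_shift (t : List (List (String × String))) (acc : String) :
    t.foldl (fun acc e => if entryGet e "name" ≠ "" then acc ++ (" | " ++ entryGet e "name") else acc) acc
      = acc ++ extraOf t := by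
  induction t generalizing acc with
  | nil => simp [extraOf, String.append_empty]
  | cons e t ih =>
    by_cases h : entryGet e "name" ≠ ""
    · simp only [List.foldl_cons, if_pos h]
      rw [ih]
      have h2 : extraOf (e :: t) = ("" ++ (" | " ++ entryGet e "name")) ++ extraOf t := by
        simp only [extraOf, List.foldl_cons, if_pos h]
        exact ih _
      rw [h2, String.empty_append, String.append_assoc]
    · simp only [List.foldl_cons, if_neg h]
      rw [ih]
      congr 1
      simp only [extraOf, List.foldl_cons, if_neg h]

theorem seq_fold (t : List (List (String × String))) (h : List (String × String)) :
    t.foldl (fun cur e => if entryGet e "name" ≠ "" then nameAppend cur (" | " ++ entryGet e "name") else cur) h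
      = nameAppend h (extraOf t) := by
  induction t generalizing h with
  | nil => simp [extraOf, nameAppend_empty]
  | cons e t ih =>
    simp only [List.foldl_cons]
    by_cases hn : entryGet e "name" ≠ ""
    · simp only [if_pos hn, ih, nameAppend_append]
      congr 1
      rw [show extraOf (e :: t) = t.foldl _ (if entryGet e "name" ≠ "" then "" ++ (" | " ++ entryGet e "name") else "") from rfl]
      simp only [if_pos hn, extra_shift, String.empty_append]
    · simp only [if_neg hn, ih]
      congr 1
      rw [show extraOf (e :: t) = t.foldl _ (if entryGet e "name" ≠ "" then "" ++ (" | " ++ entryGet e "name") else "") from rfl]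
      simp only [if_neg hn]
      rfl

-- B's per-group merge equals A's sequential merge of the group
theorem perGroup_eq_seq (grp : List (List (String × String))) :
    (let merged := grp.headD []
     let extra := (grp.drop 1).foldl
       (fun acc e => if entryGet e "name" ≠ "" then acc ++ (" | " ++ entryGet e "name") else acc) ""
     if extra ≠ "" then nameAppend merged extra else merged) = seqMerge grp := by
  cases grp with
  | nil => rfl
  | cons h t =>
    simp only [List.headD_cons, List.drop_one, List.tail_cons, seqMerge, seq_fold]
    have : t.foldl (fun acc e => if entryGet e "name" ≠ "" then acc ++ (" | " ++ entryGet e "name") else acc) "" = extraOf t := rfl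
    rw [this]
    split_ifs with hx
    · rfl
    · rw [not_ne_iff.mp hx, nameAppend_empty]

theorem keys_mapVals (g : PySem.Dict String (List (List (String × String)))) :
    (mapVals g).keys = g.keys := by
  simp only [mapVals, PySem.Dict.keys, List.map_map]
  rfl

theorem contains_mapVals (g : PySem.Dict String (List (List (String × String)))) (x : String) :
    (mapVals g).contains x = g.contains x := by
  rw [PySem.Dict.contains_eq_decide_mem_keys, PySem.Dict.contains_eq_decide_mem_keys, keys_mapVals]

theorem getD_mapVals (g : PySem.Dict String (List (List (String × String)))) (key : String)
    (grp : List (List (String × String))) (hnd : g.keys.Nodup) (hg : g.get? key = some grp) :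
    (mapVals g).getD key [] = seqMerge grp := by
  have hmem : (key, grp) ∈ g.items := PySem.Dict.mem_items_of_get?_eq_some g hg
  have hmem' : (key, seqMerge grp) ∈ (mapVals g).items := by
    simp only [mapVals]
    exact List.mem_map.mpr ⟨(key, grp), hmem, rfl⟩
  exact PySem.Dict.getD_of_mem_items (mapVals g) hmem' (by rw [keys_mapVals]; exact hnd) []

-- the single-step commutation: A's step on the merged view = the merged view of B's step
theorem step_comm (g : PySem.Dict String (List (List (String × String)))) (entry : List (String × String))
    (trim_by_key : String) (hnd : g.keys.Nodup) (hv : ∀ p ∈ g.items, p.2 ≠ []) :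
    (let key := entryGet entry trim_by_key
     if (mapVals g).contains key then
       if entryGet entry "name" ≠ "" then
         (mapVals g).insert key (nameAppend ((mapVals g).getD key []) (" | " ++ entryGet entry "name"))
       else mapVals g
     else (mapVals g).insert key entry)
    = mapVals (g.insert (entryGet entry trim_by_key) (g.getD (entryGet entry trim_by_key) [] ++ [entry])) := by
  set key := entryGet entry trim_by_key with hkey
  by_cases hc : g.contains key = true
  · -- existing group
    obtain ⟨grp, hg⟩ : ∃ grp, g.get? key = some grp := by
      rw [PySem.Dict.contains_eq_isSome_get?] at hc
      exact Option.isSome_iff_exists.mp hc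
    have hgrp_ne : grp ≠ [] := hv _ (PySem.Dict.mem_items_of_get?_eq_some g hg)
    have hDg : g.getD key [] = grp := PySem.Dict.getD_of_get?_eq_some g [] hg
    have hmapsD : (mapVals g).getD key [] = seqMerge grp := getD_mapVals g key grp hnd hg
    obtain ⟨h0, t0⟩ := List.exists_cons_of_ne_nil hgrp_ne
    obtain ⟨t, rfl⟩ := t0
    have hseq_app : seqMerge ((h0 :: t) ++ [entry])
        = if entryGet entry "name" ≠ "" then nameAppend (seqMerge (h0 :: t)) (" | " ++ entryGet entry "name") else seqMerge (h0 :: t) := by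
      simp only [seqMerge, List.cons_append, List.foldl_append, List.foldl_cons, List.foldl_nil]
    simp only [contains_mapVals, hc, if_true, hDg, hmapsD]
    apply PySem.Dict.ext
    by_cases hn : entryGet entry "name" ≠ ""
    · simp only [if_pos hn]
      rw [PySem.Dict.items_insert_of_contains (mapVals g) _ (by rw [contains_mapVals]; exact hc),
          show (mapVals (g.insert key (h0 :: t ++ [entry]))).items
            = ((g.insert key (h0 :: t ++ [entry])).items.map mvEntry) from rfl,
          PySem.Dict.items_insert_of_contains g _ hc]
      simp only [mapVals, List.map_map]
      apply List.map_congr_left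
      intro p hp
      simp only [Function.comp_apply, mvEntry]
      by_cases hpk : (p.1 == key) = true
      · simp only [hpk, if_true, hseq_app, if_pos hn]
      · simp only [hpk, Bool.false_eq_true, if_false]
    · simp only [if_neg hn]
      rw [show (mapVals (g.insert key (h0 :: t ++ [entry]))).items
            = ((g.insert key (h0 :: t ++ [entry])).items.map mvEntry) from rfl,
          PySem.Dict.items_insert_of_contains g _ hc]
      simp only [mapVals, List.map_map]
      symm
      apply List.map_congr_left
      intro p hp
      simp only [Function.comp_apply]
      by_cases hpk : (p.1 == key) = true
      · have hpk' : p.1 = key := by simpa using hpk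
        have hp2 : p.2 = h0 :: t := by
          have h1 : g.get? p.1 = some p.2 := PySem.Dict.get?_of_mem_items g (by rwa [← Prod.mk.eta (p := p)] at hp) hnd
          rw [hpk', hg] at h1
          exact (Option.some.injEq _ _ ▸ h1).symm
        rw [show p = (key, h0 :: t) from by rw [← hpk', ← hp2]]
        simp only [beq_self_eq_true, if_true]
        simp only [mvEntry]
        rw [hseq_app, if_neg hn]
      · simp only [hpk, Bool.false_eq_true, if_false]
  · -- fresh key
    have hc' : g.contains key = false := by simpa using hc
    have hDg : g.getD key [] = [] := PySem.Dict.getD_of_not_contains g [] hc'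
    simp only [contains_mapVals, hc', Bool.false_eq_true, if_false, hDg, List.nil_append]
    apply PySem.Dict.ext
    rw [PySem.Dict.items_insert_of_not_contains (mapVals g) _ (by rw [contains_mapVals]; exact hc'),
        show (mapVals (g.insert key [entry])).items = ((g.insert key [entry]).items.map mvEntry) from rfl,
        PySem.Dict.items_insert_of_not_contains g _ hc']
    simp [mapVals, mvEntry, seqMerge]

-- the whole-fold commutation, by induction with the grouping invariants
theorem fold_comm (sl : List (List (String × String))) (trim_by_key : String)
    (g : PySem.Dict String (List (List (String × String))))
    (hnd : g.keys.Nodup) (hv : ∀ p ∈ g.items, p.2 ≠ []) :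
    sl.foldl
      (fun (merged : PySem.Dict String (List (String × String))) entry =>
        let key := entryGet entry trim_by_key
        if merged.contains key then
          if entryGet entry "name" ≠ "" then
            merged.insert key (nameAppend (merged.getD key []) (" | " ++ entryGet entry "name"))
          else merged
        else merged.insert key entry)
      (mapVals g)
    = mapVals (sl.foldl
        (fun (g : PySem.Dict String (List (List (String × String)))) entry =>
          g.insert (entryGet entry trim_by_key) (g.getD (entryGet entry trim_by_key) [] ++ [entry])) g) := by
  induction sl generalizing g with
  | nil => rfl
  | cons entry sl ih =>
    simp only [List.foldl_cons]
    rw [step_comm g entry trim_by_key hnd hv]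
    apply ih
    · exact PySem.Dict.nodup_keys_insert _ _ _ hnd
    · intro p hp
      rcases (PySem.Dict.mem_items_insert _ _ _ _).mp hp with rfl | ⟨hpg, _⟩
      · simp
      · exact hv _ hpg

-- ===== VERDICT (by name: the statement is the Claim_ definition above) =====
theorem trim_service_list_py_spec : Claim_equal_trim_service_list_py := by
  intro service_list trim_by_key _ _
  show trim_service_list_py service_list trim_by_key = trim_service_list_py_alt service_list trim_by_key
  unfold trim_service_list_py trim_service_list_py_alt
  have hempty : (PySem.Dict.empty : PySem.Dict String (List (String × String))) = mapVals PySem.Dict.empty := rfl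
  rw [hempty, fold_comm service_list trim_by_key PySem.Dict.empty (by simp [PySem.Dict.keys_empty]) (by intro p hp; simp [PySem.Dict.empty] at hp)]
  set G := service_list.foldl _ PySem.Dict.empty
  simp only [mapVals, PySem.Dict.values, List.map_map]
  apply List.map_congr_left
  intro p hp
  simpa using (perGroup_eq_seq p.2).symm
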